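-- pv_equiv track=rewrite | github.com/justjacobrosario/BS_Computer_Science_UPD_Repo | 1st Year 1st Sem/python test drive/lab5/e.py | grass_triplets
-- ===== SOURCE A (Python) =====
-- def grass_triplets(lawn):
--     pre_occurences = prefix_occurences(lawn)
--     count = 0
--
--     for i in range(len(lawn)):
--
--         occ_i = 1 if lawn[i] == "x" else 0
--         for j in range(i, len(lawn)):
--             if i < j:
--                 if lawn[j] == "x":
--                     occ_i += 1
--                 if occ_i == 3:
--                     count += 1
--     return count
--
-- def prefix_occurences(lawn):
--     res = [0]
--
--     for cell in lawn:
--         if cell == "x":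
--             res.append(res[-1]+1)
--         else:
--             res.append(res[-1])
--     res.pop(0)
--     return res
-- ===== SOURCE B (Python) =====
-- def grass_triplets(lawn):
--     freq = {0: 1}
--     p = 0
--     count = 0
--     for cell in lawn:
--         if cell == "x":
--             p += 1
--         count += freq.get(p - 3, 0)
--         freq[p] = freq.get(p, 0) + 1
--     return count
-- ===== Notes on version B (the rewrite author's own statement) =====
-- stated objective: faster
-- what changed: Replaced the O(n^2) double loop over all start/end index pairs by a single pass that keeps a frequency dictionary of prefix x-counts and adds freq[prefix-3] at each position.
import Mathlib
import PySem

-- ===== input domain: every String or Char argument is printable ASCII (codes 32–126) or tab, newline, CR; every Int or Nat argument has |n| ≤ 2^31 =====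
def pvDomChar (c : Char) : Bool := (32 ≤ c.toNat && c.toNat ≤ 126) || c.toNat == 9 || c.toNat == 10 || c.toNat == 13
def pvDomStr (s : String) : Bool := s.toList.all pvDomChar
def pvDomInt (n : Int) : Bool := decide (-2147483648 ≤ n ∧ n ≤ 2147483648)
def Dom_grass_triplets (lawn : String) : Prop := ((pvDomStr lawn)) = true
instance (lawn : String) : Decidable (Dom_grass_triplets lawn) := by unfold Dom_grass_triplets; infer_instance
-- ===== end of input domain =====

-- B replaces A's O(n^2) scan over all index pairs by a single pass with a dictionary of prefix x-counts.

-- ===== PORT A =====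
-- helper: prefix_occurences (computed by A but never used for its result)
def prefix_occurences (lawn : String) : List Int :=
  let res := lawn.toList.foldl
    (fun res cell =>
      if cell = 'x' then res ++ [PySem.List.pyGetD res (-1) 0 + 1]
      else res ++ [PySem.List.pyGetD res (-1) 0])
    [(0 : Int)]
  res.drop 1  -- res.pop(0)

def grass_triplets (lawn : String) : Int :=
  let s := lawn.toList
  let _pre := prefix_occurences lawn
  (PySem.List.pyRange 0 (PySem.List.len s) 1).foldl
    (fun count i =>
      let occ_i : Int := if PySem.List.pyGet? s i = some 'x' then 1 else 0
      ((PySem.List.pyRange i (PySem.List.len s) 1).foldl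
        (fun (st : Int × Int) j =>
          if i < j then
            let occ := if PySem.List.pyGet? s j = some 'x' then st.1 + 1 else st.1
            let cnt := if occ = 3 then st.2 + 1 else st.2
            (occ, cnt)
          else st)
        (occ_i, count)).2)
    0

-- ===== PORT B =====
def grass_triplets_alt (lawn : String) : Int :=
  (lawn.toList.foldl
    (fun (st : PySem.Dict Int Int × Int × Int) cell =>
      let p := if cell = 'x' then st.2.1 + 1 else st.2.1
      let count := st.2.2 + st.1.getD (p - 3) 0
      let freq := st.1.insert p (st.1.getD p 0 + 1)
      (freq, p, count))
    (PySem.Dict.ofList [((0 : Int), (1 : Int))], 0, 0)).2.2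

-- ===== PRECONDITION & SPEC =====
def Spec_grass_triplets (lawn : String) (out : Int) : Prop := out = grass_triplets_alt lawn
instance (lawn : String) (out : Int) : Decidable (Spec_grass_triplets lawn out) := by unfold Spec_grass_triplets; infer_instance

-- ===== CLAIM (what is proved, stated in full; the proofs are below) =====
def Claim_equal_grass_triplets : Prop := ∀ (lawn : String), Dom_grass_triplets lawn → Spec_grass_triplets lawn (grass_triplets lawn)

-- ===== LEMMAS AND PROOFS =====

-- number of 'x' among the first k characters
def pvP (s : List Char) (k : Nat) : Nat := ((s.take k).count 'x')

-- A's inner-loop count for start index i (end indices j in (i, n))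
def pvTA (s : List Char) (n i : Nat) : Nat :=
  (List.range' (i + 1) (n - (i + 1))).countP (fun j => pvP s (j + 1) = pvP s i + 3)

-- B's per-position count restricted to start indices strictly below j
def pvTB (s : List Char) (j : Nat) : Nat :=
  (List.range j).countP (fun m => pvP s (j + 1) = pvP s m + 3)

-- B's per-position count (start indices up to and including j)
def pvG (s : List Char) (j : Nat) : Nat :=
  (List.range (j + 1)).countP (fun m => pvP s (j + 1) = pvP s m + 3)

-- B's loop body, named for the proofs (definitionally the lambda in grass_triplets_alt)
def pvStep (st : PySem.Dict Int Int × Int × Int) (cell : Char) : PySem.Dict Int Int × Int × Int :=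
  let p := if cell = 'x' then st.2.1 + 1 else st.2.1
  let count := st.2.2 + st.1.getD (p - 3) 0
  let freq := st.1.insert p (st.1.getD p 0 + 1)
  (freq, p, count)

theorem pvP_succ (s : List Char) (k : Nat) (hk : k < s.length) :
    pvP s (k + 1) = pvP s k + (if s[k]? = some 'x' then 1 else 0) := by
  rw [pvP, pvP, List.take_add_one, List.getElem?_eq_getElem hk, List.count_append]
  by_cases h : s[k] = 'x' <;> simp [h]

theorem pvP_succ_le (s : List Char) (k : Nat) :
    pvP s (k + 1) ≤ pvP s k + 1 := by
  rcases Nat.lt_or_ge k s.length with hk | hk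
  · rw [pvP_succ s k hk]; split <;> omega
  · unfold pvP
    rw [List.take_of_length_le hk, List.take_of_length_le (by omega)]
    omega

-- A's inner loop, from position a > i onwards
theorem pvInnerA (s : List Char) (iN : Nat) (k : Nat) :
    ∀ (a : Nat) (c occ : Int), iN < a → a + k = s.length →
      occ = (pvP s a : Int) - (pvP s iN : Int) →
      ((PySem.List.pyRange (a : Int) (s.length : Int) 1).foldl
        (fun (st : Int × Int) j =>
          if (iN : Int) < j then
            let occ := if PySem.List.pyGet? s j = some 'x' then st.1 + 1 else st.1
            let cnt := if occ = 3 then st.2 + 1 else st.2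
            (occ, cnt)
          else st)
        (occ, c)).2
      = c + ((List.range' a k).countP (fun j => pvP s (j + 1) = pvP s iN + 3) : Int) := by
  induction k with
  | zero =>
    intro a c occ hia hak hocc
    rw [PySem.List.pyRange_one_eq_nil (by omega)]
    simp
  | succ k ih =>
    intro a c occ hia hak hocc
    have ha : a < s.length := by omega
    rw [PySem.List.pyRange_one_cons (by exact_mod_cast ha)]
    rw [List.foldl_cons]
    have hlt : (iN : Int) < (a : Int) := by exact_mod_cast hia
    simp only [hlt, if_true, PySem.List.pyGet?_natCast]
    have hcast : ((a : Int) + 1) = ((a + 1 : Nat) : Int) := by push_cast; ring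
    rw [hcast]
    have hP := pvP_succ s a ha
    have hocc' : (if s[a]? = some 'x' then occ + 1 else occ)
        = ((pvP s (a + 1) : Int)) - (pvP s iN : Int) := by
      by_cases h : s[a]? = some 'x' <;> simp [h] at hP ⊢ <;> omega
    rw [hocc']
    rw [ih (a + 1) _ _ (by omega) (by omega) rfl]
    rw [show List.range' a (k + 1) = a :: List.range' (a + 1) k from List.range'_succ]
    rw [List.countP_cons]
    by_cases hq : pvP s (a + 1) = pvP s iN + 3
    · simp [hq]
      ring
    · have : ¬ (((pvP s (a + 1) : Int)) - (pvP s iN : Int) = 3) := by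
        intro h; apply hq; omega
      simp [hq, this]

-- one outer-loop iteration of A adds pvTA
theorem pvOuterBody (s : List Char) (i : Nat) (c : Int) (hi : i < s.length) :
    ((PySem.List.pyRange (i : Int) ((s.length : Nat) : Int) 1).foldl
        (fun (st : Int × Int) j =>
          if (i : Int) < j then
            let occ := if PySem.List.pyGet? s j = some 'x' then st.1 + 1 else st.1
            let cnt := if occ = 3 then st.2 + 1 else st.2
            (occ, cnt)
          else st)
        ((if PySem.List.pyGet? s (i : Int) = some 'x' then (1:Int) else 0), c)).2
      = c + (pvTA s s.length i : Int) := by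
  rw [PySem.List.pyRange_one_cons (by exact_mod_cast hi), List.foldl_cons]
  simp only [lt_irrefl, if_false]
  have hcast : ((i : Int) + 1) = ((i + 1 : Nat) : Int) := by push_cast; ring
  rw [hcast]
  have hP := pvP_succ s i hi
  have hocc : (if PySem.List.pyGet? s (i : Int) = some 'x' then (1:Int) else 0)
      = ((pvP s (i + 1) : Int)) - (pvP s i : Int) := by
    rw [PySem.List.pyGet?_natCast]
    by_cases h : s[i]? = some 'x' <;> simp [h] at hP ⊢ <;> omega
  rw [hocc, pvInnerA s i (s.length - (i + 1)) (i + 1) c _ (by omega) (by omega) rfl]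
  rfl

-- A is the double sum of pvTA
theorem pvA_eq (lawn : String) :
    grass_triplets lawn
      = (((List.range lawn.toList.length).map (pvTA lawn.toList lawn.toList.length)).sum : Nat) := by
  set s := lawn.toList with hs
  have haux : ∀ (ns : List Nat) (c : Int), (∀ i ∈ ns, i < s.length) →
      ns.foldl
        (fun count i =>
          ((PySem.List.pyRange ((i : Nat) : Int) ((s.length : Nat) : Int) 1).foldl
            (fun (st : Int × Int) j =>
              if ((i : Nat) : Int) < j then
                let occ := if PySem.List.pyGet? s j = some 'x' then st.1 + 1 else st.1
                let cnt := if occ = 3 then st.2 + 1 else st.2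
                (occ, cnt)
              else st)
            ((if PySem.List.pyGet? s ((i : Nat) : Int) = some 'x' then (1:Int) else 0), count)).2)
        c = c + ((ns.map (pvTA s s.length)).sum : Nat) := by
    intro ns
    induction ns with
    | nil => intro c _; simp
    | cons a l ih =>
      intro c h
      rw [List.foldl_cons, pvOuterBody s a c (h a (by simp)), ih _ (fun i hi => h i (by simp [hi]))]
      simp only [List.map_cons, List.sum_cons]
      push_cast
      ring
  show (PySem.List.pyRange 0 (PySem.List.len s) 1).foldl _ 0 = _
  rw [PySem.List.len_eq, PySem.List.pyRange_zero_nat, List.foldl_map]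
  have := haux (List.range s.length) 0 (fun i hi => List.mem_range.mp hi)
  rw [this]
  simp

-- B's loop invariant: after processing t, p is the x-count of t, freq maps each value v
-- to the number of prefixes of t with x-count v, and count is B's partial sum
theorem pvBGo (u : List Char) : ∀ (t : List Char) (freq : PySem.Dict Int Int) (p count : Int),
    p = (pvP t t.length : Int) →
    (∀ v : Int, freq.getD v 0 = (((List.range (t.length + 1)).countP (fun m => (pvP t m : Int) = v) : Nat) : Int)) →
    count = (((List.range t.length).map (pvG t)).sum : Nat) →
    (u.foldl pvStep (freq, p, count)).2.2
      = (((List.range (t ++ u).length).map (pvG (t ++ u))).sum : Nat) := by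
  induction u with
  | nil => intro t freq p count _ _ hcount; simpa using hcount
  | cons c u ih =>
    intro t freq p count hp hf hcount
    rw [List.foldl_cons]
    have hstep : pvStep (freq, p, count) c
        = (freq.insert (if c = 'x' then p + 1 else p)
             (freq.getD (if c = 'x' then p + 1 else p) 0 + 1),
           (if c = 'x' then p + 1 else p),
           count + freq.getD ((if c = 'x' then p + 1 else p) - 3) 0) := rfl
    rw [hstep]
    have htake : ∀ m : Nat, m ≤ t.length → pvP (t ++ [c]) m = pvP t m := by
      intro m hm
      simp [pvP, List.take_append_of_le_length hm]
    have hlen : (t ++ [c]).length = t.length + 1 := by simp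
    have hfull : pvP (t ++ [c]) (t.length + 1) = pvP t t.length + (if c = 'x' then 1 else 0) := by
      have h1 : (t ++ [c]).take (t.length + 1) = t ++ [c] := List.take_of_length_le (by simp)
      rw [pvP, pvP, h1, List.take_length, List.count_append]
      by_cases h : c = 'x' <;> simp [h]
    have hp' : (if c = 'x' then p + 1 else p) = (pvP (t ++ [c]) ((t ++ [c]).length) : Nat) := by
      rw [hlen, hfull]
      by_cases h : c = 'x' <;> simp [h, hp]
    have hf' : ∀ v : Int,
        (freq.insert (if c = 'x' then p + 1 else p) (freq.getD (if c = 'x' then p + 1 else p) 0 + 1)).getD v 0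
          = (((List.range ((t ++ [c]).length + 1)).countP (fun m => (pvP (t ++ [c]) m : Int) = v) : Nat) : Int) := by
      intro v
      rw [PySem.Dict.getD_insert, hlen, List.range_succ, List.countP_append]
      have h1 : (List.range (t.length + 1)).countP (fun m => (pvP (t ++ [c]) m : Int) = v)
          = (List.range (t.length + 1)).countP (fun m => (pvP t m : Int) = v) := by
        apply List.countP_congr
        intro m hm
        rw [htake m (by have := List.mem_range.mp hm; omega)]
      have h2 : (List.countP (fun m => (pvP (t ++ [c]) m : Int) = v) [t.length + 1])
          = if (pvP (t ++ [c]) (t.length + 1) : Int) = v then 1 else 0 := by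
        simp [List.countP_cons]
      rw [h1, h2]
      by_cases hv : v = (if c = 'x' then p + 1 else p)
      · subst hv
        rw [if_pos rfl, hf]
        have hcond : (pvP (t ++ [c]) (t.length + 1) : Int) = (if c = 'x' then p + 1 else p) := by
          rw [hp', hlen]
        rw [if_pos hcond]
        push_cast
        ring
      · rw [if_neg hv, hf]
        have hcond : ¬ ((pvP (t ++ [c]) (t.length + 1) : Int) = v) := by
          intro h; apply hv; rw [← h, hp', hlen]
        rw [if_neg hcond]
        push_cast
        ring
    have hc' : count + freq.getD ((if c = 'x' then p + 1 else p) - 3) 0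
        = (((List.range ((t ++ [c]).length)).map (pvG (t ++ [c]))).sum : Nat) := by
      rw [hlen, List.range_succ, List.map_append, List.sum_append]
      have h1 : (List.range t.length).map (pvG (t ++ [c])) = (List.range t.length).map (pvG t) := by
        apply List.map_congr_left
        intro j hj
        have hjn : j < t.length := List.mem_range.mp hj
        unfold pvG
        rw [htake (j + 1) (by omega)]
        apply List.countP_congr
        intro m hm
        rw [htake m (by have := List.mem_range.mp hm; omega)]
      have h2 : freq.getD ((if c = 'x' then p + 1 else p) - 3) 0
          = (pvG (t ++ [c]) t.length : Int) := by
        rw [hf]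
        unfold pvG
        have hcongr : (List.range (t.length + 1)).countP (fun m => (pvP t m : Int) = (if c = 'x' then p + 1 else p) - 3)
            = (List.range (t.length + 1)).countP (fun m => pvP (t ++ [c]) (t.length + 1) = pvP (t ++ [c]) m + 3) := by
          apply List.countP_congr
          intro m hm
          have hm' : m ≤ t.length := by have := List.mem_range.mp hm; omega
          rw [htake m hm']
          have := hp'
          rw [hlen] at this
          rw [this]
          simp only [decide_eq_true_eq]
          omega
        rw [hcongr]
      rw [h1, h2, hcount]
      simp only [List.map_cons, List.map_nil, List.sum_cons, List.sum_nil]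
      push_cast
      ring
    rw [ih (t ++ [c]) _ _ _ hp' hf' hc', List.append_assoc, List.singleton_append]

-- B is the sum of pvG
theorem pvB_eq (lawn : String) :
    grass_triplets_alt lawn
      = (((List.range lawn.toList.length).map (pvG lawn.toList)).sum : Nat) := by
  show (lawn.toList.foldl pvStep (PySem.Dict.ofList [((0 : Int), (1 : Int))], 0, 0)).2.2 = _
  have h := pvBGo lawn.toList [] (PySem.Dict.ofList [((0 : Int), (1 : Int))]) 0 0
    (by simp [pvP]) ?_ (by simp)
  · simpa using h
  · intro v
    have : PySem.Dict.ofList [((0 : Int), (1 : Int))] = PySem.Dict.empty.insert 0 1 := rfl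
    rw [this, PySem.Dict.getD_insert]
    simp [pvP, List.range_succ]
    by_cases hv : v = 0 <;> simp [hv]
    · omega

-- the diagonal term of pvG is impossible (a single character holds no three x's)
theorem pvB_term (s : List Char) (j : Nat) : pvG s j = pvTB s j := by
  have := pvP_succ_le s j
  rw [pvG, pvTB, List.range_succ, List.countP_append]
  simp only [List.countP_cons, List.countP_nil]
  have hj : ¬ (pvP s (j + 1) = pvP s j + 3) := by omega
  simp [hj]

-- exchanging the order of the double summation
theorem pvSwap (q : Nat → Nat → Bool) (n : Nat) :
    ((List.range n).map (fun i => (List.range' (i + 1) (n - (i + 1))).countP (fun j => q i j))).sum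
      = ((List.range n).map (fun j => (List.range j).countP (fun i => q i j))).sum := by
  induction n with
  | zero => simp
  | succ n ih =>
    rw [List.range_succ, List.map_append, List.map_append, List.sum_append, List.sum_append]
    have h1 : ((List.range n).map (fun i => (List.range' (i + 1) (n + 1 - (i + 1))).countP (fun j => q i j)))
        = (List.range n).map (fun i => (List.range' (i + 1) (n - (i + 1))).countP (fun j => q i j)
            + (if q i n then 1 else 0)) := by
      apply List.map_congr_left
      intro i hi
      have hi' : i < n := List.mem_range.mp hi
      have : n + 1 - (i + 1) = (n - (i + 1)) + 1 := by omega
      rw [this, List.range'_1_concat, List.countP_append]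
      have : i + 1 + (n - (i + 1)) = n := by omega
      simp [this, List.countP_cons]
    rw [h1, List.sum_map_add, PySem.List.sum_map_ite_one_zero_nat (fun i => q i n), ih]
    simp

-- ===== VERDICT (by name: the statement is the Claim_ definition above) =====
theorem grass_triplets_spec : Claim_equal_grass_triplets := by
  intro lawn _
  show grass_triplets lawn = grass_triplets_alt lawn
  rw [pvA_eq, pvB_eq]
  have h2 : (List.range lawn.toList.length).map (pvG lawn.toList)
      = (List.range lawn.toList.length).map (pvTB lawn.toList) := by
    apply List.map_congr_left
    intro j _
    exact pvB_term lawn.toList j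
  rw [h2]
  have h := pvSwap (fun i j => decide (pvP lawn.toList (j + 1) = pvP lawn.toList i + 3)) lawn.toList.length
  congr 1
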